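-- pv_equiv track=rewrite | github.com/pwr2001-netizen/ant_stack_v2 | bin/feed_eval_v1.py | header_value
-- ===== SOURCE A (Python) =====
-- def header_value(headers: str, key: str):
--     key_l = key.lower()
--     for ln in headers.splitlines():
--         if ":" in ln:
--             k,v = ln.split(":",1)
--             if k.strip().lower() == key_l:
--                 return v.strip()
--     return ""
-- ===== SOURCE B (Python) =====
-- def header_value(headers: str, key: str):
--     table = {}
--     for ln in headers.splitlines():
--         if ":" in ln:
--             k, v = ln.split(":", 1)
--             table.setdefault(k.strip().lower(), v.strip())
--     return table.get(key.lower(), "")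
-- ===== Notes on version B (the rewrite author's own statement) =====
-- stated objective: idiomatic
-- what changed: Instead of interleaving match-and-return while scanning, B parses all header lines once into a dict (setdefault keeps the first occurrence of each key) and then answers with a single d.get(key.lower(), "").
import Mathlib
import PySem

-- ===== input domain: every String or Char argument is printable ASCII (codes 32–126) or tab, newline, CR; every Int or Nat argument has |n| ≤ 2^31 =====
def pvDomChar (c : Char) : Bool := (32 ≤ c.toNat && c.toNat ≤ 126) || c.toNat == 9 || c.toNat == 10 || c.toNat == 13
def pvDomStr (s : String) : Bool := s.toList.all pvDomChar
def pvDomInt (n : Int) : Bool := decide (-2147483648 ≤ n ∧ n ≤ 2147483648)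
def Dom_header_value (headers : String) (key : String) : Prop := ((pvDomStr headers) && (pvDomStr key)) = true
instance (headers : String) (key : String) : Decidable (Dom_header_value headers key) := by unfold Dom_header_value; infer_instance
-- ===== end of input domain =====

-- B parses all header lines once into a dict (setdefault keeps the first occurrence),
-- then answers with a single lookup; objective: idiomatic.

-- ===== PORT A =====
-- the for-loop with early return, as structural recursion over the lines
def headerA_go (key_l : String) : List String → String
  | [] => ""
  | ln :: rest =>
    if PySem.Str.isIn ":" ln then
      match PySem.Str.splitMax? ln ":" 1 with
      | some (k :: v :: _) =>
        if PySem.Str.lower (PySem.Str.strip k) == key_l then PySem.Str.strip v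
        else headerA_go key_l rest
      | _ => headerA_go key_l rest   -- unreachable: ':' ∈ ln gives two parts
    else headerA_go key_l rest

def header_value (headers : String) (key : String) : String :=
  headerA_go (PySem.Str.lower key) (PySem.Str.splitlines headers)

-- ===== PORT B =====
def headerB_step (d : PySem.Dict String String) (ln : String) : PySem.Dict String String :=
  if PySem.Str.isIn ":" ln then
    match PySem.Str.splitMax? ln ":" 1 with
    | some (k :: v :: _) =>
      d.setdefault (PySem.Str.lower (PySem.Str.strip k)) (PySem.Str.strip v)
    | _ => d   -- unreachable: ':' ∈ ln gives two parts
  else d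

def header_value_alt (headers : String) (key : String) : String :=
  let table := (PySem.Str.splitlines headers).foldl headerB_step PySem.Dict.empty
  table.getD (PySem.Str.lower key) ""

-- ===== PRECONDITION & SPEC =====
def Spec_header_value (headers : String) (key : String) (out : String) : Prop := out = header_value_alt headers key
instance (headers : String) (key : String) (out : String) : Decidable (Spec_header_value headers key out) := by unfold Spec_header_value; infer_instance

-- ===== CLAIM (what is proved, stated in full; the proofs are below) =====
def Claim_equal_header_value : Prop := ∀ (headers : String) (key : String), Dom_header_value headers key → Spec_header_value headers key (header_value headers key)

-- ===== LEMMAS AND PROOFS =====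
-- Invariant: folding B's step over the remaining lines and looking up key_l gives
-- the accumulator's value if it already holds key_l, else A's first-match scan.
theorem headerB_invariant (key_l : String) (lines : List String)
    (d : PySem.Dict String String) :
    (lines.foldl headerB_step d).getD key_l "" =
      (if d.contains key_l then d.getD key_l "" else headerA_go key_l lines) := by
  induction lines generalizing d with
  | nil =>
    simp only [List.foldl, headerA_go]
    by_cases h : d.contains key_l = true
    · simp [h]
    · simp [h, PySem.Dict.getD_of_not_contains d "" (by simpa using h)]
  | cons ln rest ih =>
    simp only [List.foldl, headerA_go, headerB_step]
    by_cases hc : PySem.Str.isIn ":" ln = true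
    · simp only [hc, if_true]
      cases hsp : PySem.Str.splitMax? ln ":" 1 with
      | none => exact ih d
      | some parts =>
        match parts with
        | [] => exact ih d
        | [k] => exact ih d
        | k :: v :: tl =>
          simp only []
          generalize PySem.Str.lower (PySem.Str.strip k) = kk
          generalize PySem.Str.strip v = vv
          rw [ih]
          by_cases hk : kk = key_l
          · subst hk
            rw [PySem.Dict.contains_setdefault, PySem.Dict.getD_setdefault_self]
            by_cases hd : d.contains kk = true
            · rw [PySem.Dict.getD_eq_get?_getD, PySem.Dict.getD_eq_get?_getD]
              obtain ⟨w, hw⟩ := Option.isSome_iff_exists.mp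
                (show (d.get? kk).isSome by rw [← PySem.Dict.contains_eq_isSome_get?]; exact hd)
              simp [hd, hw]
            · simp [hd, PySem.Dict.getD_of_not_contains d vv (by simpa using hd)]
          · rw [PySem.Dict.contains_setdefault,
                PySem.Dict.getD_eq_get?_getD,
                PySem.Dict.get?_setdefault_of_ne d vv (fun h => hk h.symm),
                ← PySem.Dict.getD_eq_get?_getD]
            have h1 : ¬ (key_l = kk) := fun h => hk h.symm
            simp [h1, hk]
    · simp only [hc]
      exact ih d

theorem header_value_eq_alt (headers key : String) :
    header_value headers key = header_value_alt headers key := by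
  unfold header_value header_value_alt
  rw [headerB_invariant]
  simp [PySem.Dict.contains_empty]

-- ===== VERDICT (by name: the statement is the Claim_ definition above) =====
theorem header_value_spec : Claim_equal_header_value := by
  intro headers key _
  unfold Spec_header_value
  exact header_value_eq_alt headers key
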